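-- pv_equiv track=rewrite | github.com/Anshul00Sharma/Twitter-bot-buildathon-project | bot.py | merge_dict_lists
-- ===== SOURCE A (Python) =====
-- def merge_dict_lists(list1, list2):
--     merged_dict = {}
--     for d in list1 + list2:
--         key = d['id']  # Use the id as the unique key
--         if key in merged_dict:
--             # Prefer the dictionary with replied: true
--             if d['replied']:
--                 merged_dict[key] = d
--         else:
--             merged_dict[key] = d
--     return list(merged_dict.values())
-- ===== SOURCE B (Python) =====
-- def merge_dict_lists(list1, list2):
--     # Two-pass: group dicts by id in first-appearance order, then reduce each group.
--     groups = {}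
--     for d in list1 + list2:
--         groups.setdefault(d['id'], []).append(d)
--     result = []
--     for group in groups.values():
--         chosen = group[0]
--         for e in group[1:]:
--             if e['replied']:
--                 chosen = e
--         result.append(chosen)
--     return result
-- ===== Notes on version B (the rewrite author's own statement) =====
-- stated objective: alternative
-- what changed: Replaces the interleaved keep-best-in-dict single pass by a two-phase index-then-reduce: one pass groups the dicts by id in first-appearance order, a second pass reduces each group to its last truthy-replied element (else its first).
import Mathlib
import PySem

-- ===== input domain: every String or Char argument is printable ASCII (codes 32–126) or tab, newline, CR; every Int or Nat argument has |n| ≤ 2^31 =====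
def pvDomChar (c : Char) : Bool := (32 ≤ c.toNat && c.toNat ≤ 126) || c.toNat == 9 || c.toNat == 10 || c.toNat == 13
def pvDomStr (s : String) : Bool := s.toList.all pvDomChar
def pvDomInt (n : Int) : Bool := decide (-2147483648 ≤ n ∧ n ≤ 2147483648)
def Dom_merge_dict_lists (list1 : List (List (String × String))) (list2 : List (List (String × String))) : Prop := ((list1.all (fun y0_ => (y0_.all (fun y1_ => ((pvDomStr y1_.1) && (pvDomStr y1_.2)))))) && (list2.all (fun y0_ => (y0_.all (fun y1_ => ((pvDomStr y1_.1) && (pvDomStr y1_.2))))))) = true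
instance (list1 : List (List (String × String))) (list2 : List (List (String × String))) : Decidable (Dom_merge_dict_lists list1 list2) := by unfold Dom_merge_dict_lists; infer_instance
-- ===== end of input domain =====

-- B replaces A's single keep-best-in-dict pass by a two-phase group-by-id-then-reduce; objective: alternative decomposition (same cost).

-- shared primitive: Python's d[key] on an association-list dict (first match; none = KeyError)
def pvLookup (d : List (String × String)) (k : String) : Option String :=
  PySem.Dict.get? (PySem.Dict.mk d) k

-- ===== PORT A =====
-- the 'for d in list1 + list2' loop of A; state = merged_dict; none = a KeyError was raised
def pvLoopA : PySem.Dict String (List (String × String)) → List (List (String × String)) → Option (PySem.Dict String (List (String × String)))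
  | m, [] => some m
  | m, d :: rest =>
    match pvLookup d "id" with
    | none => none
    | some key =>
      if m.contains key then
        match pvLookup d "replied" with
        | none => none
        | some r => pvLoopA (if r ≠ "" then m.insert key d else m) rest
      else pvLoopA (m.insert key d) rest

def merge_dict_lists (list1 : List (List (String × String))) (list2 : List (List (String × String))) : List (List (String × String)) :=
  match pvLoopA PySem.Dict.empty (list1 ++ list2) with
  | some m => m.values
  | none => []  -- unreachable under Pre_merge_dict_lists (Python raises KeyError)

-- ===== PORT B =====
-- first pass of B: groups.setdefault(d['id'], []).append(d)
def pvGroup : PySem.Dict String (List (List (String × String))) → List (List (String × String)) → Option (PySem.Dict String (List (List (String × String))))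
  | g, [] => some g
  | g, d :: rest =>
    match pvLookup d "id" with
    | none => none
    | some key => pvGroup (g.insert key (g.getD key [] ++ [d])) rest

-- inner loop of B: for e in group[1:]: if e['replied']: chosen = e
def pvReduce : List (String × String) → List (List (String × String)) → Option (List (String × String))
  | chosen, [] => some chosen
  | chosen, e :: rest =>
    match pvLookup e "replied" with
    | none => none
    | some r => pvReduce (if r ≠ "" then e else chosen) rest

-- second pass of B over groups.values()
def pvPick : List (List (List (String × String))) → Option (List (List (String × String)))
  | [] => some []
  | [] :: _ => none  -- group[0] on an empty group: unreachable (groups are built non-empty)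
  | (h :: t) :: rest =>
    match pvReduce h t with
    | none => none
    | some c =>
      match pvPick rest with
      | none => none
      | some cs => some (c :: cs)

def merge_dict_lists_alt (list1 : List (List (String × String))) (list2 : List (List (String × String))) : List (List (String × String)) :=
  match pvGroup PySem.Dict.empty (list1 ++ list2) with
  | none => []  -- unreachable under Pre_merge_dict_lists
  | some g => (pvPick g.values).getD []

-- ===== PRECONDITION & SPEC =====
-- Pre_ is exactly where Python A returns: every dict has an 'id' key, and any dict whose id
-- already appeared earlier in list1 + list2 has a 'replied' key (otherwise A raises KeyError).
def Pre_merge_dict_lists (list1 : List (List (String × String))) (list2 : List (List (String × String))) : Prop :=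
  (∀ d ∈ list1 ++ list2, (pvLookup d "id").isSome = true) ∧
  (list1 ++ list2).Pairwise (fun a b => pvLookup a "id" = pvLookup b "id" → (pvLookup b "replied").isSome = true)
instance (list1 : List (List (String × String))) (list2 : List (List (String × String))) : Decidable (Pre_merge_dict_lists list1 list2) := by unfold Pre_merge_dict_lists; infer_instance

def pvWitness_merge_dict_lists : (List (List (String × String))) × (List (List (String × String))) :=
  ([[("id", "1"), ("replied", "")]], [[("id", "1"), ("replied", "x")], [("id", "2"), ("replied", "")]])

def Spec_merge_dict_lists (list1 : List (List (String × String))) (list2 : List (List (String × String))) (out : List (List (String × String))) : Prop := out = merge_dict_lists_alt list1 list2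
instance (list1 : List (List (String × String))) (list2 : List (List (String × String))) (out : List (List (String × String))) : Decidable (Spec_merge_dict_lists list1 list2 out) := by unfold Spec_merge_dict_lists; infer_instance

-- ===== CLAIM (what is proved, stated in full; the proofs are below) =====
def Claim_equal_merge_dict_lists : Prop := ∀ (list1 : List (List (String × String))) (list2 : List (List (String × String))), Dom_merge_dict_lists list1 list2 → Pre_merge_dict_lists list1 list2 → Spec_merge_dict_lists list1 list2 (merge_dict_lists list1 list2)

-- ===== LEMMAS AND PROOFS =====

-- entry invariant: A's dict entry for a key holds exactly the reduction of B's group for that key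
def pvERel (a : String × List (String × String)) (b : String × List (List (String × String))) : Prop :=
  a.1 = b.1 ∧ ∃ h t, b.2 = h :: t ∧ pvReduce h t = some a.2

lemma pvAny_eq {ms : List (String × List (String × String))} {gs : List (String × List (List (String × String)))}
    (hF : List.Forall₂ pvERel ms gs) (k : String) :
    ms.any (fun p => p.1 == k) = gs.any (fun p => p.1 == k) := by
  induction hF with
  | nil => rfl
  | cons hab _ ih => simp only [List.any_cons, hab.1, ih]

lemma pvFind_rel {ms : List (String × List (String × String))} {gs : List (String × List (List (String × String)))}
    (hF : List.Forall₂ pvERel ms gs) (k : String) :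
    (ms.find? (fun p => p.1 == k) = none ∧ gs.find? (fun p => p.1 == k) = none) ∨
    (∃ a b, ms.find? (fun p => p.1 == k) = some a ∧ gs.find? (fun p => p.1 == k) = some b ∧ pvERel a b) := by
  induction hF with
  | nil => left; simp
  | @cons a b ms' gs' hab _ ih =>
    by_cases hk : (a.1 == k) = true
    · right
      refine ⟨a, b, ?_, ?_, hab⟩
      · simp [hk]
      · simp [← hab.1, hk]
    · have hk' : (b.1 == k) = false := by rw [← hab.1]; simpa using hk
      have hk2 : (a.1 == k) = false := by simpa using hk
      simpa [List.find?_cons, hk2, hk'] using ih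

lemma pvReduce_append {t : List (List (String × String))} :
    ∀ {c v : List (String × String)} {d : List (String × String)} {r : String},
    pvLookup d "replied" = some r → pvReduce c t = some v →
    pvReduce c (t ++ [d]) = some (if r ≠ "" then d else v) := by
  induction t with
  | nil =>
    intro c v d r hr hv
    simp [pvReduce] at hv
    subst hv
    simp [pvReduce, hr]
  | cons e rest ih =>
    intro c v d r hr hv
    rw [List.cons_append]
    simp only [pvReduce] at hv ⊢
    cases he : pvLookup e "replied" with
    | none => rw [he] at hv; exact absurd hv (by simp)
    | some re => rw [he] at hv; exact ih hr hv

lemma pvRepl_both {ms : List (String × List (String × String))} {gs : List (String × List (List (String × String)))}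
    (hF : List.Forall₂ pvERel ms gs) {k : String} {w : List (String × String)} {grp' : List (List (String × String))}
    (hE : pvERel (k, w) (k, grp')) :
    List.Forall₂ pvERel (ms.map (fun p => if p.1 == k then (k, w) else p))
      (gs.map (fun p => if p.1 == k then (k, grp') else p)) := by
  induction hF with
  | nil => constructor
  | @cons a b ms' gs' hab _ ih =>
    simp only [List.map_cons]
    refine List.Forall₂.cons ?_ ih
    by_cases hk : (a.1 == k) = true
    · have hk' : (b.1 == k) = true := by rw [← hab.1]; exact hk
      simp only [hk, hk', if_pos]
      exact hE
    · have hk' : (b.1 == k) = false := by rw [← hab.1]; simpa using hk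
      simp only [hk, hk', Bool.false_eq_true, if_false]
      exact hab

lemma pvRepl_right {ms : List (String × List (String × String))} {gs : List (String × List (List (String × String)))}
    {k : String} {grp' : List (List (String × String))}
    (hF : List.Forall₂ pvERel ms gs)
    (hall : ∀ a ∈ ms, a.1 = k → pvERel a (k, grp')) :
    List.Forall₂ pvERel ms (gs.map (fun p => if p.1 == k then (k, grp') else p)) := by
  induction hF with
  | nil => constructor
  | @cons a b ms' gs' hab _ ih =>
    simp only [List.map_cons]
    refine List.Forall₂.cons ?_ (ih (fun a' ha' => hall a' (List.mem_cons_of_mem _ ha')))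
    by_cases hk : (b.1 == k) = true
    · simp only [hk, if_pos]
      exact hall a (List.mem_cons_self) (by rw [hab.1]; exact eq_of_beq hk)
    · simp only [hk, Bool.false_eq_true, if_false]
      exact hab

lemma pvAny_fst {α : Type} (l : List (String × α)) (k : String) :
    l.any (fun p => p.1 == k) = (l.map Prod.fst).any (fun x => x == k) := by
  simp [List.any_map, Function.comp_def]

lemma pvKeys_map_replace (ms : List (String × List (String × String))) (k : String) (w : List (String × String)) :
    ((ms.map (fun p => if p.1 == k then (k, w) else p)).map Prod.fst) = ms.map Prod.fst := by
  induction ms with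
  | nil => rfl
  | cons a rest ih =>
    by_cases hk : (a.1 == k) = true
    · simp only [List.map_cons, hk, if_pos, ih]
      have : a.1 = k := eq_of_beq hk
      simp [this]
    · simp only [List.map_cons, hk, Bool.false_eq_true, if_false, ih]

lemma pvPick_rel {ms : List (String × List (String × String))} {gs : List (String × List (List (String × String)))}
    (hF : List.Forall₂ pvERel ms gs) :
    pvPick (gs.map (fun x => x.2)) = some (ms.map (fun x => x.2)) := by
  induction hF with
  | nil => rfl
  | @cons a b ms' gs' hab _ ih =>
    obtain ⟨-, h, t, hbt, hred⟩ := hab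
    simp only [List.map_cons, hbt, pvPick, hred, ih]

lemma pvSim : ∀ (L : List (List (String × String)))
    (m : PySem.Dict String (List (String × String)))
    (g : PySem.Dict String (List (List (String × String)))),
    List.Forall₂ pvERel m.items g.items →
    (m.items.map Prod.fst).Nodup →
    (∀ e ∈ L, (pvLookup e "id").isSome = true) →
    L.Pairwise (fun a b => pvLookup a "id" = pvLookup b "id" → (pvLookup b "replied").isSome = true) →
    (∀ e ∈ L, ∀ k, pvLookup e "id" = some k → m.contains k = true → (pvLookup e "replied").isSome = true) →
    ∃ m' g', pvLoopA m L = some m' ∧ pvGroup g L = some g' ∧ List.Forall₂ pvERel m'.items g'.items := by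
  intro L
  induction L with
  | nil => intro m g hF _ _ _ _; exact ⟨m, g, rfl, rfl, hF⟩
  | cons d rest ih =>
    intro m g hF hnd hid hpw hrep
    obtain ⟨key, hkey⟩ : ∃ key, pvLookup d "id" = some key := by
      have := hid d (List.mem_cons_self)
      cases h : pvLookup d "id" with
      | none => rw [h] at this; simp at this
      | some k => exact ⟨k, rfl⟩
    have hcg : g.contains key = m.contains key := by
      unfold PySem.Dict.contains
      exact (pvAny_eq hF key).symm
    by_cases hc : m.contains key = true
    · -- key already present: A reads d['replied']
      obtain ⟨r, hr⟩ : ∃ r, pvLookup d "replied" = some r := by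
        have := hrep d (List.mem_cons_self) key hkey hc
        cases h : pvLookup d "replied" with
        | none => rw [h] at this; simp at this
        | some r => exact ⟨r, rfl⟩
      -- the group entry corresponding to the key
      have hfind := pvFind_rel hF key
      rcases hfind with ⟨hfn, -⟩ | ⟨a0, b0, ha0, hb0, hE0⟩
      · exfalso
        unfold PySem.Dict.contains at hc
        rw [List.any_eq_true] at hc
        obtain ⟨p, hp, hpk⟩ := hc
        have := List.find?_eq_none.mp hfn p hp
        exact this hpk
      obtain ⟨hab1, h0, t0, hbt0, hred0⟩ := hE0
      have ha0k : a0.1 = key := by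
        have := List.find?_some ha0
        exact eq_of_beq (by simpa using this)
      have hb0k : b0.1 = key := by rw [← hab1]; exact ha0k
      -- B's new group value
      have hgetD : g.getD key [] = b0.2 := by
        unfold PySem.Dict.getD PySem.Dict.get?
        rw [hb0]
        rfl
      have hgc : g.contains key = true := by rw [hcg]; exact hc
      have hredapp : pvReduce h0 (t0 ++ [d]) = some (if r ≠ "" then d else a0.2) :=
        pvReduce_append hr hred0
      -- new states
      have hstep : ∃ m2 g2,
          (if r ≠ "" then m.insert key d else m) = m2 ∧
          g.insert key (g.getD key [] ++ [d]) = g2 ∧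
          List.Forall₂ pvERel m2.items g2.items ∧ (m2.items.map Prod.fst).Nodup := by
        refine ⟨_, _, rfl, rfl, ?_, ?_⟩
        · unfold PySem.Dict.insert
          rw [hgc, if_pos rfl]
          by_cases hrr : r ≠ ""
          · rw [if_pos hrr, hc, if_pos rfl]
            simp only
            refine pvRepl_both hF ?_
            refine ⟨rfl, h0, t0 ++ [d], ?_, ?_⟩
            · simp [hgetD, hbt0]
            · rw [hredapp, if_pos hrr]
          · rw [if_neg hrr]
            simp only
            refine pvRepl_right hF ?_
            intro a ha hak
            have ha0m : a0 ∈ m.items := List.mem_of_find?_eq_some ha0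
            have haa0 : a = a0 := by
              have hinj := List.inj_on_of_nodup_map hnd
              exact hinj ha ha0m (by rw [hak, ha0k])
            subst haa0
            refine ⟨ha0k, h0, t0 ++ [d], ?_, ?_⟩
            · simp [hgetD, hbt0]
            · rw [hredapp, if_neg hrr]
        · by_cases hrr : r ≠ ""
          · rw [if_pos hrr]
            unfold PySem.Dict.insert
            rw [hc, if_pos rfl]
            show ((List.map (fun p => if p.1 == key then (key, d) else p) m.items).map Prod.fst).Nodup
            rw [pvKeys_map_replace]
            exact hnd
          · rw [if_neg hrr]; exact hnd
      obtain ⟨m2, g2, hm2, hg2, hF2, hnd2⟩ := hstep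
      have hcont2 : ∀ k', m2.contains k' = m.contains k' := by
        intro k'
        rw [← hm2]
        by_cases hrr : r ≠ ""
        · rw [if_pos hrr]
          unfold PySem.Dict.contains PySem.Dict.insert
          rw [hc, if_pos rfl]
          show (List.map (fun p => if p.1 == key then (key, d) else p) m.items).any (fun p => p.1 == k') = m.items.any (fun p => p.1 == k')
          rw [pvAny_fst, pvKeys_map_replace, ← pvAny_fst]
        · rw [if_neg hrr]
      obtain ⟨m', g', hA, hB, hF'⟩ := ih m2 g2 hF2 hnd2
        (fun e he => hid e (List.mem_cons_of_mem _ he))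
        (List.Pairwise.sublist (List.sublist_cons_self d rest) hpw)
        (fun e he k' hk' hck' => hrep e (List.mem_cons_of_mem _ he) k' hk' (by rw [← hcont2 k']; exact hck'))
      refine ⟨m', g', ?_, ?_, hF'⟩
      · simp only [pvLoopA, hkey, hc, if_pos, hr]
        rw [hm2]; exact hA
      · simp only [pvGroup, hkey]
        rw [hg2]; exact hB
    · -- new key: both append
      have hc' : m.contains key = false := by simpa using hc
      have hcf : (m.items.any fun p => p.1 == key) = false := hc'
      have hgc : g.contains key = false := by rw [hcg]; exact hc'
      have hgetD : g.getD key [] = [] := by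
        unfold PySem.Dict.getD PySem.Dict.get?
        have hfn : g.items.find? (fun p => p.1 == key) = none := by
          rw [List.find?_eq_none]
          intro p hp hpk
          unfold PySem.Dict.contains at hgc
          exact absurd hpk (by simpa using List.any_eq_false.mp hgc p hp)
        rw [hfn]
        rfl
      have hF2 : List.Forall₂ pvERel (m.insert key d).items (g.insert key (g.getD key [] ++ [d])).items := by
        unfold PySem.Dict.insert
        rw [hc', hgc]
        simp only [Bool.false_eq_true, if_false]
        refine List.rel_append hF ?_
        refine List.Forall₂.cons ?_ List.Forall₂.nil
        exact ⟨rfl, d, [], by simp [hgetD], rfl⟩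
      have hnd2 : ((m.insert key d).items.map Prod.fst).Nodup := by
        unfold PySem.Dict.insert
        rw [hc']
        simp only [Bool.false_eq_true, if_false, List.map_append, List.map_cons, List.map_nil]
        rw [List.nodup_append]
        refine ⟨hnd, List.nodup_singleton _, ?_⟩
        intro x hx y hy
        have hyk : y = key := by simpa using hy
        subst hyk
        obtain ⟨p, hp, hpk⟩ := List.mem_map.mp hx
        intro hxy
        exact (List.any_eq_false.mp hcf p hp) (by simp [hpk, hxy])
      have hcont2 : ∀ k', (m.insert key d).contains k' = true → k' = key ∨ m.contains k' = true := by
        intro k' hk'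
        rw [PySem.Dict.contains_insert] at hk'
        rcases Bool.or_eq_true_iff.mp hk' with h | h
        · left; exact eq_of_beq h
        · right; exact h
      obtain ⟨m', g', hA, hB, hF'⟩ := ih (m.insert key d) (g.insert key (g.getD key [] ++ [d])) hF2 hnd2
        (fun e he => hid e (List.mem_cons_of_mem _ he))
        (List.Pairwise.sublist (List.sublist_cons_self d rest) hpw)
        (by
          intro e he k' hk' hck'
          rcases hcont2 k' hck' with hkk | hmk
          · subst hkk
            have hrel := (List.pairwise_cons.mp hpw).1 e he
            exact hrel (by rw [hkey, hk'])
          · exact hrep e (List.mem_cons_of_mem _ he) k' hk' hmk)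
      refine ⟨m', g', ?_, ?_, hF'⟩
      · simp only [pvLoopA, hkey, hc', Bool.false_eq_true, if_false]
        exact hA
      · simp only [pvGroup, hkey]
        exact hB

-- ===== VERDICT (by name: the statement is the Claim_ definition above) =====
theorem merge_dict_lists_spec : Claim_equal_merge_dict_lists := by
  intro list1 list2 _ hpre
  obtain ⟨hid, hpw⟩ := hpre
  obtain ⟨m', g', hA, hB, hF'⟩ := pvSim (list1 ++ list2) PySem.Dict.empty PySem.Dict.empty
    List.Forall₂.nil List.nodup_nil hid hpw
    (by intro e _ k _ hck; exact absurd hck (by simp [PySem.Dict.contains, PySem.Dict.empty]))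
  unfold Spec_merge_dict_lists merge_dict_lists merge_dict_lists_alt
  rw [hA, hB]
  show m'.values = (pvPick g'.values).getD []
  unfold PySem.Dict.values
  rw [pvPick_rel hF']
  rfl
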